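-- pv_equiv track=rewrite | github.com/YPCTFs/YPCTF2023-Rev-Challenge-ezpy | src/ezpy.py | check_flag
-- ===== SOURCE A (Python) =====
-- F1Ag = [0x4a, 0x43, 0x50, 0x47, 0x55, 0x68, 0x44, 0x76, 0x70, 0x23, 0x7e, 0x76, 0x4c, 0x67, 0x23, 0x4c, 0x67, 0x7b, 0x20, 0x4c, 0x64, 0x23, 0x61, 0x7f, 0x77, 0x4c, 0x23, 0x75, 0x4c, 0x63, 0x6a, 0x67, 0x5b, 0x23, 0x7d, 0x6e]
--
-- def check_flag(flag: str):
--     buf = bytearray(flag.encode())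
--     if len(buf) != 36:
--         return False
--     for i in range(36):
--         buf[i] ^= 0x13
--
--     for i in range(36):
--         if buf[i] != F1Ag[i]:
--             return False
--     return True
-- ===== SOURCE B (Python) =====
-- F1Ag = [0x4a, 0x43, 0x50, 0x47, 0x55, 0x68, 0x44, 0x76, 0x70, 0x23, 0x7e, 0x76, 0x4c, 0x67, 0x23, 0x4c, 0x67, 0x7b, 0x20, 0x4c, 0x64, 0x23, 0x61, 0x7f, 0x77, 0x4c, 0x23, 0x75, 0x4c, 0x63, 0x6a, 0x67, 0x5b, 0x23, 0x7d, 0x6e]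
--
-- def check_flag(flag: str):
--     # Branch-free constant-time-style check: OR all mismatch bits (length
--     # difference and per-byte XOR residues) into one accumulator; flag is
--     # correct iff no mismatch bit is ever set.
--     data = flag.encode()
--     acc = len(data) ^ 36
--     for c, t in zip(data, F1Ag):
--         acc |= c ^ t ^ 0x13
--     return acc == 0
-- ===== Notes on version B (the rewrite author's own statement) =====
-- stated objective: alternative
-- what changed: B replaces A's length branch, in-place XOR pass and early-exit comparison loop with a branch-free constant-time-style check: it ORs every mismatch bit (length XOR 36, and each byte's XOR residue against the target) into a single accumulator and returns whether the accumulator is zero.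
import Mathlib
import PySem

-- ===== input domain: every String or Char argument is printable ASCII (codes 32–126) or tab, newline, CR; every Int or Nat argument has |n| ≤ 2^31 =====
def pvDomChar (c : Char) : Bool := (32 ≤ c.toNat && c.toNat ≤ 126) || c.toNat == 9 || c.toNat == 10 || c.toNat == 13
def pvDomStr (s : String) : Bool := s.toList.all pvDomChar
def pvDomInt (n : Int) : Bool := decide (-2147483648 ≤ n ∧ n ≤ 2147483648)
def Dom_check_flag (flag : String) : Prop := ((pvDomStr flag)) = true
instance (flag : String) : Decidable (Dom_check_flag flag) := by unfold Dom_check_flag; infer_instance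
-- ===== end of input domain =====

-- B changes: branch-free one-pass check that ORs all mismatch bits (length XOR 36 and
-- per-byte XOR residues) into one accumulator and tests it for zero (alternative).
-- On Dom_check_flag every character is ≤ 0x7E, so flag.encode() is exactly the list of char codes.

-- ===== PORT A =====
def F1Ag : List Nat := [0x4a, 0x43, 0x50, 0x47, 0x55, 0x68, 0x44, 0x76, 0x70, 0x23, 0x7e, 0x76, 0x4c, 0x67, 0x23, 0x4c, 0x67, 0x7b, 0x20, 0x4c, 0x64, 0x23, 0x61, 0x7f, 0x77, 0x4c, 0x23, 0x75, 0x4c, 0x63, 0x6a, 0x67, 0x5b, 0x23, 0x7d, 0x6e]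

def check_flag (flag : String) : Bool :=
  -- buf = bytearray(flag.encode()); exact on Dom (ASCII): bytes are the char codes
  let buf := flag.toList.map Char.toNat
  if buf.length ≠ 36 then false
  else
    -- for i in range(36): buf[i] ^= 0x13
    let buf := (List.range 36).foldl (fun b i => b.set i (b.getD i 0 ^^^ 0x13)) buf
    -- for i in range(36): if buf[i] != F1Ag[i]: return False / return True
    (List.range 36).all (fun i => buf.getD i 0 == F1Ag.getD i 0)

-- ===== PORT B =====
def check_flag_alt (flag : String) : Bool :=
  -- data = flag.encode(); exact on Dom (ASCII): bytes are the char codes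
  let data := flag.toList.map Char.toNat
  -- acc = len(data) ^ 36; for c, t in zip(data, F1Ag): acc |= c ^ t ^ 0x13
  let acc := (data.zip F1Ag).foldl (fun a p => a ||| (p.1 ^^^ p.2 ^^^ 0x13)) (data.length ^^^ 36)
  acc == 0

-- ===== PRECONDITION & SPEC =====
def Spec_check_flag (flag : String) (out : Bool) : Prop := out = check_flag_alt flag
instance (flag : String) (out : Bool) : Decidable (Spec_check_flag flag out) := by unfold Spec_check_flag; infer_instance

-- ===== CLAIM (what is proved, stated in full; the proofs are below) =====
def Claim_equal_check_flag : Prop := ∀ (flag : String), Dom_check_flag flag → Spec_check_flag flag (check_flag flag)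

-- ===== LEMMAS AND PROOFS =====

-- A's first loop, on a buffer of length ≥ n, XOR-maps the first n entries in place.
theorem foldl_set_xor (buf : List Nat) (n : Nat) (h : n ≤ buf.length) :
    (List.range n).foldl (fun b i => b.set i (b.getD i 0 ^^^ 0x13)) buf
      = (buf.take n).map (· ^^^ 0x13) ++ buf.drop n := by
  induction n with
  | zero => simp
  | succ m ih =>
      rw [List.range_succ, List.foldl_append, ih (by omega), List.foldl_cons, List.foldl_nil]
      have hm : m < buf.length := by omega
      have hlen : ((buf.take m).map (· ^^^ 0x13)).length = m := by
        simp [List.length_take, Nat.min_eq_left (le_of_lt hm)]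
      have hget : ((buf.take m).map (· ^^^ 0x13) ++ buf.drop m).getD m 0 = buf[m] := by
        simp [List.getD_eq_getElem?_getD, List.getElem?_append_right, List.getElem?_drop,
              Nat.min_eq_left hm.le, List.getElem?_eq_getElem hm]
      rw [hget, List.set_append_right _ _ (by omega), hlen, Nat.sub_self]
      have hdrop : buf.drop m = buf[m] :: buf.drop (m + 1) := List.drop_eq_getElem_cons hm
      rw [hdrop, List.set_cons_zero]
      simp only [List.map_take]
      have hmm : m < (List.map (fun x => x ^^^ 19) buf).length := by simpa using hm
      rw [List.take_add_one, List.getElem?_eq_getElem hmm]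
      simp

-- Range-indexed elementwise equality of two length-n lists is list equality.
theorem all_range_getD_eq (xs ys : List Nat) (n : Nat) (hx : xs.length = n) (hy : ys.length = n) :
    ((List.range n).all (fun i => xs.getD i 0 == ys.getD i 0)) = (xs == ys) := by
  apply Bool.eq_iff_iff.mpr
  simp only [List.all_eq_true, List.mem_range, beq_iff_eq]
  constructor
  · intro h
    apply List.ext_getElem (by omega)
    intro i hi _
    have := h i (by omega)
    rwa [List.getD_eq_getElem _ _ (by omega), List.getD_eq_getElem _ _ (by omega)] at this
  · intro h i hi
    rw [h]

-- a ||| b = 0 iff both are zero.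
theorem or_eq_zero (a b : Nat) : a ||| b = 0 ↔ a = 0 ∧ b = 0 := by
  constructor
  · intro h
    have h1 : a ≤ a ||| b := Nat.left_le_or
    have h2 : b ≤ a ||| b := Nat.right_le_or
    omega
  · rintro ⟨rfl, rfl⟩; rfl

-- B's OR-fold is zero iff the seed and every folded residue are zero.
theorem foldl_or_eq_zero (l : List (Nat × Nat)) (init : Nat) :
    (l.foldl (fun a p => a ||| (p.1 ^^^ p.2 ^^^ 0x13)) init = 0) ↔
      (init = 0 ∧ ∀ p ∈ l, p.1 ^^^ p.2 ^^^ 0x13 = 0) := by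
  induction l generalizing init with
  | nil => simp
  | cons y ys ih =>
      simp only [List.foldl_cons, ih, or_eq_zero, List.mem_cons]
      constructor
      · rintro ⟨⟨h1, h2⟩, h3⟩
        exact ⟨h1, fun p hp => hp.elim (fun e => e ▸ h2) (h3 p)⟩
      · rintro ⟨h1, h2⟩
        exact ⟨⟨h1, h2 y (Or.inl rfl)⟩, fun p hp => h2 p (Or.inr hp)⟩

-- For equal-length lists, zero XOR residues on the zip characterise the mapped equality.
theorem zip_residue_iff (xs ys : List Nat) (h : xs.length = ys.length) :
    (∀ p ∈ xs.zip ys, p.1 ^^^ p.2 ^^^ 0x13 = 0) ↔ xs.map (· ^^^ 0x13) = ys := by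
  induction xs generalizing ys with
  | nil => cases ys <;> simp_all
  | cons x xs ih =>
      cases ys with
      | nil => simp at h
      | cons y ys =>
          simp only [List.zip_cons_cons, List.mem_cons, List.map_cons, List.cons.injEq]
          constructor
          · intro hp
            have hx := hp (x, y) (Or.inl rfl)
            have hxy : x ^^^ y = 0x13 := Nat.xor_eq_zero_iff.mp hx
            have hx13 : x ^^^ 0x13 = y := by
              rw [← hxy, ← Nat.xor_assoc, Nat.xor_self, Nat.zero_xor]
            exact ⟨hx13, (ih ys (by simpa using h)).mp (fun p hp' => hp p (Or.inr hp'))⟩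
          · rintro ⟨h1, h2⟩
            intro p hp
            rcases hp with hp | hp
            · subst hp; simp only
              rw [← h1]
              simp
            · exact (ih ys (by simpa using h)).mpr h2 p hp

-- ===== VERDICT (by name: the statement is the Claim_ definition above) =====
theorem check_flag_spec : Claim_equal_check_flag := by
  intro flag _
  unfold Spec_check_flag check_flag check_flag_alt
  set cs := flag.toList.map Char.toNat with hcs
  by_cases h : cs.length = 36
  · simp only [h, ne_eq, not_true_eq_false, if_false]
    rw [foldl_set_xor cs 36 (by omega)]
    rw [List.take_of_length_le (by omega), List.drop_eq_nil_of_le (by omega), List.append_nil]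
    rw [all_range_getD_eq _ _ 36 (by simpa using h) (by decide)]
    apply Bool.eq_iff_iff.mpr
    simp only [beq_iff_eq]
    rw [foldl_or_eq_zero]
    rw [zip_residue_iff cs F1Ag (by rw [h]; decide)]
    constructor
    · intro hm; exact ⟨by decide, hm⟩
    · rintro ⟨_, hm⟩; exact hm
  · simp only [h, ne_eq, not_false_eq_true, if_true]
    symm
    apply beq_eq_false_iff_ne.mpr
    intro hz
    exact h (Nat.xor_eq_zero_iff.mp ((foldl_or_eq_zero _ _).mp hz).1)
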